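-- pv_equiv track=rewrite | github.com/UTResearchAssistant/UTResearchAssistant | agents/analysis_agent.py | _categorize_themes
-- ===== SOURCE A (Python) =====
-- from typing import Dict, List, Any, Optional
--
-- def _categorize_themes(themes: List[str]) -> Dict[str, List[str]]:
--     """Categorize themes into broader categories."""
--     categories = {
--         'Technology': ['machine_learning', 'deep_learning', 'nlp', 'computer_vision', 'robotics'],
--         'Data & Analytics': ['data_science', 'analytics', 'data_mining'],
--         'Applications': ['healthcare', 'education', 'sustainability'],
--         'Infrastructure': ['security', 'privacy', 'cybersecurity']
--     }
--
--     categorized = {cat: [] for cat in categories.keys()}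
--     uncategorized = []
--
--     for theme in themes:
--         categorized_theme = False
--         for category, theme_list in categories.items():
--             if theme in theme_list:
--                 categorized[category].append(theme)
--                 categorized_theme = True
--                 break
--
--         if not categorized_theme:
--             uncategorized.append(theme)
--
--     if uncategorized:
--         categorized['Other'] = uncategorized
--
--     return {k: v for k, v in categorized.items() if v}
-- ===== SOURCE B (Python) =====
-- from typing import Dict, List
--
-- def _categorize_themes(themes: List[str]) -> Dict[str, List[str]]:
--     """Categorize themes into broader categories (category-major pass)."""
--     categories = {
--         'Technology': ['machine_learning', 'deep_learning', 'nlp', 'computer_vision', 'robotics'],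
--         'Data & Analytics': ['data_science', 'analytics', 'data_mining'],
--         'Applications': ['healthcare', 'education', 'sustainability'],
--         'Infrastructure': ['security', 'privacy', 'cybersecurity']
--     }
--     known = set(t for lst in categories.values() for t in lst)
--     result = {}
--     for category, theme_list in categories.items():
--         bucket = [t for t in themes if t in theme_list]
--         if bucket:
--             result[category] = bucket
--     other = [t for t in themes if t not in known]
--     if other:
--         result['Other'] = other
--     return result
-- ===== Notes on version B (the rewrite author's own statement) =====
-- stated objective: alternative
-- what changed: Transposed the loop nest: instead of scanning the category table per theme with a found-flag and break, B makes one filtering pass per fixed category (plus one pass against the union set for 'Other') and assembles the result dict directly, dropping empty buckets as it goes.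
import Mathlib
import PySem

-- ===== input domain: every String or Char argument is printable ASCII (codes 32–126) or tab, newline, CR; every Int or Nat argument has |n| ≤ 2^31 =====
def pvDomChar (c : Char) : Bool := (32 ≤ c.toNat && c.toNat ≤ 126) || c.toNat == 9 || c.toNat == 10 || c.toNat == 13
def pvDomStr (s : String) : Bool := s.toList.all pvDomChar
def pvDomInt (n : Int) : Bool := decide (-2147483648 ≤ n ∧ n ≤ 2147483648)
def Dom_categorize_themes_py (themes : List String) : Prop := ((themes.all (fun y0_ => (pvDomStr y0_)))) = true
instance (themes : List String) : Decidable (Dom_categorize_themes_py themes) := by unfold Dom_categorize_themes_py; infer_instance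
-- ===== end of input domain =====

-- B transposes A's loop nest (one filtering pass per fixed category instead of a per-theme
-- scan with a break); same result, stated objective: alternative decomposition.

-- the fixed category table both Pythons write as a literal dict
def pvCategories : List (String × List String) :=
  [("Technology", ["machine_learning", "deep_learning", "nlp", "computer_vision", "robotics"]),
   ("Data & Analytics", ["data_science", "analytics", "data_mining"]),
   ("Applications", ["healthcare", "education", "sustainability"]),
   ("Infrastructure", ["security", "privacy", "cybersecurity"])]

-- ===== PORT A =====
-- inner 'for category, theme_list in categories.items(): … break' (returns the dict and the flag)
def pvInnerA (theme : String) (items : List (String × List String))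
    (categorized : PySem.Dict String (List String)) : PySem.Dict String (List String) × Bool :=
  match items with
  | [] => (categorized, false)
  | (category, theme_list) :: rest =>
    if theme_list.contains theme then
      (categorized.modify category [] (fun v => v ++ [theme]), true)
    else pvInnerA theme rest categorized

-- outer 'for theme in themes:' carrying (categorized, uncategorized)
def pvLoopA : List String → PySem.Dict String (List String) → List String →
    PySem.Dict String (List String) × List String
  | [], categorized, uncategorized => (categorized, uncategorized)
  | theme :: rest, categorized, uncategorized =>
    let r := pvInnerA theme pvCategories categorized
    if r.2 then pvLoopA rest r.1 uncategorized
    else pvLoopA rest r.1 (uncategorized ++ [theme])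

def categorize_themes_py (themes : List String) : List (String × List String) :=
  let init : PySem.Dict String (List String) :=
    PySem.Dict.ofList (pvCategories.map (fun kv => (kv.1, ([] : List String))))
  let r := pvLoopA themes init []
  let categorized := if r.2.isEmpty then r.1 else r.1.insert "Other" r.2
  categorized.items.filter (fun kv => !kv.2.isEmpty)

-- ===== PORT B =====
def categorize_themes_py_alt (themes : List String) : List (String × List String) :=
  let known : PySem.Set String := PySem.Set.ofList (pvCategories.flatMap (fun kv => kv.2))
  let buckets := pvCategories.foldl (fun acc kv =>
      let bucket := themes.filter (fun t => kv.2.contains t)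
      if bucket.isEmpty then acc else acc ++ [(kv.1, bucket)]) []
  let other := themes.filter (fun t => !known.contains t)
  if other.isEmpty then buckets else buckets ++ [("Other", other)]

-- ===== PRECONDITION & SPEC =====
def Spec_categorize_themes_py (themes : List String) (out : List (String × List String)) : Prop := out = categorize_themes_py_alt themes
instance (themes : List String) (out : List (String × List String)) : Decidable (Spec_categorize_themes_py themes out) := by unfold Spec_categorize_themes_py; infer_instance

-- ===== CLAIM (what is proved, stated in full; the proofs are below) =====
def Claim_equal_categorize_themes_py : Prop := ∀ (themes : List String), Dom_categorize_themes_py themes → Spec_categorize_themes_py themes (categorize_themes_py themes)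

-- ===== LEMMAS AND PROOFS =====

-- A's loop, started from the concrete 4-key dict shape, ends in the same shape with
-- each bucket extended by that category's themes (and the unknown themes appended).
theorem pvLoopA_char (themes l1 l2 l3 l4 u : List String) :
    pvLoopA themes (PySem.Dict.mk
      [("Technology", l1), ("Data & Analytics", l2), ("Applications", l3), ("Infrastructure", l4)]) u =
    (PySem.Dict.mk
      [("Technology", l1 ++ themes.filter (fun t => (["machine_learning", "deep_learning", "nlp", "computer_vision", "robotics"]).contains t)),
       ("Data & Analytics", l2 ++ themes.filter (fun t => (["data_science", "analytics", "data_mining"]).contains t)),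
       ("Applications", l3 ++ themes.filter (fun t => (["healthcare", "education", "sustainability"]).contains t)),
       ("Infrastructure", l4 ++ themes.filter (fun t => (["security", "privacy", "cybersecurity"]).contains t))],
     u ++ themes.filter (fun t => !(pvCategories.flatMap (fun kv => kv.2)).contains t)) := by
  induction themes generalizing l1 l2 l3 l4 u with
  | nil => simp [pvLoopA]
  | cons t rest ih =>
    simp only [pvLoopA, pvInnerA, pvCategories, List.filter_cons]
    by_cases h1 : t = "machine_learning" ∨ t = "deep_learning" ∨ t = "nlp" ∨ t = "computer_vision" ∨ t = "robotics" <;>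
    by_cases h2 : t = "data_science" ∨ t = "analytics" ∨ t = "data_mining" <;>
    by_cases h3 : t = "healthcare" ∨ t = "education" ∨ t = "sustainability" <;>
    by_cases h4 : t = "security" ∨ t = "privacy" ∨ t = "cybersecurity" <;>
      simp [h1, h2, h3, h4, PySem.Dict.modify, PySem.Dict.insert, PySem.Dict.get?, PySem.Dict.getD,
        PySem.Dict.contains, ih, List.append_assoc, pvCategories]
    all_goals
      first
      | (rcases h2 with rfl | rfl | rfl <;> simp_all only [String.reduceEq, or_self])
      | (rcases h3 with rfl | rfl | rfl <;> simp_all only [String.reduceEq, or_self])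
      | (rcases h4 with rfl | rfl | rfl <;> simp_all only [String.reduceEq, or_self])

-- ===== VERDICT (by name: the statement is the Claim_ definition above) =====
set_option maxHeartbeats 1000000 in
theorem categorize_themes_py_spec : Claim_equal_categorize_themes_py := by
  intro themes _
  show categorize_themes_py themes = categorize_themes_py_alt themes
  have hset : PySem.Set.ofList (pvCategories.flatMap (fun kv => kv.2)) =
      pvCategories.flatMap (fun kv => kv.2) := by decide
  unfold categorize_themes_py categorize_themes_py_alt
  rw [show (PySem.Dict.ofList (pvCategories.map (fun kv => (kv.1, ([] : List String))))) =
      PySem.Dict.mk [("Technology", []), ("Data & Analytics", []), ("Applications", []),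
        ("Infrastructure", [])] from rfl]
  simp only [pvLoopA_char themes [] [] [] [] [], hset, PySem.Set.contains_eq_listContains,
    List.nil_append]
  simp only [pvCategories, List.foldl, List.flatMap_cons, List.flatMap_nil,
    List.cons_append, List.nil_append, List.append_nil]
  generalize (List.filter (fun t => (["machine_learning", "deep_learning", "nlp", "computer_vision", "robotics"] : List String).contains t) themes) = F1
  generalize (List.filter (fun t => (["data_science", "analytics", "data_mining"] : List String).contains t) themes) = F2
  generalize (List.filter (fun t => (["healthcare", "education", "sustainability"] : List String).contains t) themes) = F3
  generalize (List.filter (fun t => (["security", "privacy", "cybersecurity"] : List String).contains t) themes) = F4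
  generalize (List.filter (fun t => !(["machine_learning", "deep_learning", "nlp", "computer_vision", "robotics", "data_science", "analytics", "data_mining", "healthcare", "education", "sustainability", "security", "privacy", "cybersecurity"] : List String).contains t) themes) = O
  by_cases e1 : F1.isEmpty <;>
  by_cases e2 : F2.isEmpty <;>
  by_cases e3 : F3.isEmpty <;>
  by_cases e4 : F4.isEmpty <;>
  by_cases eo : O.isEmpty <;>
    simp [e1, e2, e3, e4, eo, PySem.Dict.insert, PySem.Dict.contains]
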